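-- pv_equiv track=rewrite | github.com/RupeshMekala/AIML | Python_Basics/Functions/3using2loops$.py | print_pattern
-- ===== SOURCE A (Python) =====
-- def print_pattern(no):
--         trace = ""
--         for i in range(1, no + 1):
--             s = ""
--             for j in range(i):
--                 s += "*"
--             trace += s + "\n"
--         return trace
-- ===== SOURCE B (Python) =====
-- def print_pattern(no):
--     trace = ""
--     line = ""
--     for i in range(1, no + 1):
--         line += "*"
--         trace += line + "\n"
--     return trace
-- ===== Notes on version B (the rewrite author's own statement) =====
-- stated objective: faster
-- what changed: Replaces the nested loop that rebuilds each row character-by-character with a single loop that extends the previous row by one star, reusing the accumulated line.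
import Mathlib
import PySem

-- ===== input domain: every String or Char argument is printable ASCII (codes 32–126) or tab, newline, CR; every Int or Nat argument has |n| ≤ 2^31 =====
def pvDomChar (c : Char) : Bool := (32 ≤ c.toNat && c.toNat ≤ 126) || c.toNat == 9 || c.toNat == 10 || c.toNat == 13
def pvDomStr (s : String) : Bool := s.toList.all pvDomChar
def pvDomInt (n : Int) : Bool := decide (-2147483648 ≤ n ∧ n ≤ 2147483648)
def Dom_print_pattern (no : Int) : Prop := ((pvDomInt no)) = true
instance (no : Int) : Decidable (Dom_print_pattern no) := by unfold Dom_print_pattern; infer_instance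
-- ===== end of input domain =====

-- B replaces A's nested loop (rebuilding each row from scratch) with a single loop
-- that extends the previous row by one star; return values proved equal for all inputs.

-- ===== PORT A =====
def print_pattern (no : Int) : String :=
  (PySem.List.pyRange 1 (no + 1) 1).foldl
    (fun trace i =>
      let s := (PySem.List.pyRange 0 i 1).foldl (fun s _ => s ++ "*") ""
      trace ++ (s ++ "\n")) ""

-- ===== PORT B =====
def print_pattern_alt (no : Int) : String :=
  ((PySem.List.pyRange 1 (no + 1) 1).foldl
    (fun (p : String × String) _ =>
      let line := p.1 ++ "*"
      (line, p.2 ++ (line ++ "\n"))) ("", "")).2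

-- ===== PRECONDITION & SPEC =====
def Spec_print_pattern (no : Int) (out : String) : Prop := out = print_pattern_alt no
instance (no : Int) (out : String) : Decidable (Spec_print_pattern no out) := by unfold Spec_print_pattern; infer_instance

-- ===== CLAIM (what is proved, stated in full; the proofs are below) =====
def Claim_equal_print_pattern : Prop := ∀ (no : Int), Dom_print_pattern no → Spec_print_pattern no (print_pattern no)

-- ===== LEMMAS AND PROOFS =====

-- Invariant: after the first n rows, B's accumulator is (row n, A's trace after n rows).
lemma pv_inv (n : Nat) :
    (PySem.List.pyRange 1 ((n : Int) + 1) 1).foldl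
      (fun (p : String × String) _ =>
        let line := p.1 ++ "*"
        (line, p.2 ++ (line ++ "\n"))) ("", "") =
    ((PySem.List.pyRange 0 (n : Int) 1).foldl (fun s _ => s ++ "*") "",
     (PySem.List.pyRange 1 ((n : Int) + 1) 1).foldl
       (fun trace i =>
         let s := (PySem.List.pyRange 0 i 1).foldl (fun s _ => s ++ "*") ""
         trace ++ (s ++ "\n")) "") := by
  induction n with
  | zero => simp [PySem.List.pyRange_one_eq_nil]
  | succ m ih =>
    have h1 : ((m + 1 : Nat) : Int) + 1 = ((m : Int) + 1) + 1 := by push_cast; ring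
    have h2 : ((m + 1 : Nat) : Int) = (m : Int) + 1 := by push_cast; ring
    rw [h1, h2,
        PySem.List.pyRange_one_succ_right (a := 1) (b := (m : Int) + 1) (by omega),
        PySem.List.pyRange_one_succ_right (a := 0) (b := (m : Int)) (by omega)]
    simp only [List.foldl_append, List.foldl_cons, List.foldl_nil, ih]
    rw [PySem.List.pyRange_one_succ_right (a := 0) (b := (m : Int)) (by omega)]
    simp [String.append_assoc]

theorem pv_main (no : Int) : print_pattern_alt no = print_pattern no := by
  unfold print_pattern print_pattern_alt
  by_cases h : no ≤ 0
  · rw [PySem.List.pyRange_one_eq_nil (by omega)]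
    simp
  · obtain ⟨n, hn⟩ : ∃ n : Nat, no = (n : Int) := ⟨no.toNat, by omega⟩
    subst hn
    rw [pv_inv n]

-- ===== VERDICT (by name: the statement is the Claim_ definition above) =====
theorem print_pattern_spec : Claim_equal_print_pattern := by
  intro no _
  unfold Spec_print_pattern
  exact (pv_main no).symm
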